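-- pv_equiv track=rewrite | github.com/chlendyd7/Algorithm | 리뉴얼/2025/1/first/2/practice/과일장수.py | solution
-- ===== SOURCE A (Python) =====
-- def solution(k, m, score):
--     sort_score = sorted(score, reverse=True)
--     temp_stack = []
--     answer = 0
--     for i in range(len(score)):
--         temp_stack.append(sort_score[i])
--         if len(temp_stack) == m:
--             answer += min(temp_stack) * m
--             temp_stack = []
--     return answer
-- ===== SOURCE B (Python) =====
-- def solution(k, m, score):
--     counts = {}
--     for x in score:
--         counts[x] = counts.get(x, 0) + 1
--     vals = sorted(counts, reverse=True)
--     total = 0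
--     c = 0
--     for r in range(m, len(score) + 1, m):
--         while vals and c + counts[vals[0]] < r:
--             c += counts[vals[0]]
--             vals = vals[1:]
--         total += vals[0]
--     return total * m
-- ===== Notes on version B (the rewrite author's own statement) =====
-- stated objective: alternative
-- what changed: B never sorts or buffers the score list itself: it builds a frequency dictionary, sorts only the distinct values descending, and merges the cumulative counts against the box-end ranks m, 2m, ..., adding the value that holds each rank; A sorts the whole list and scans each m-element buffer with min().
-- outside the precondition, e.g. on solution(2, 0, [1, 2]): A returns 0, B raises ValueError
import Mathlib
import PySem

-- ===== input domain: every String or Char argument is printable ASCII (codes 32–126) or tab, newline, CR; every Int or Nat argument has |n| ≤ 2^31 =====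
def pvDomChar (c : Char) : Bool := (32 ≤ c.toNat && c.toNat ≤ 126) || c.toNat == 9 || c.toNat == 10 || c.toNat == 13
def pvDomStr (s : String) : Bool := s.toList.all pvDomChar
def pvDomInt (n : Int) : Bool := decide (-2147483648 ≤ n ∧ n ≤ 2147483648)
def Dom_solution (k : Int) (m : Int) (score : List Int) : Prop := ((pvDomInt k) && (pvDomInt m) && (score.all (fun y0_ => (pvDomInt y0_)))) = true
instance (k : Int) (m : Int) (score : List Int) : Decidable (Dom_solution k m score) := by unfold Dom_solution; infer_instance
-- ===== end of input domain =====

-- B replaces A's sort-the-whole-list / buffer-each-box algorithm by a frequency-dictionary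
-- merge: it counts occurrences, sorts only the distinct values, and sweeps the box-end ranks
-- m, 2m, … against the cumulative counts; objective: alternative.


-- ===== PORT A =====
-- loop body of A: append to temp_stack; when it holds m elements, add min(temp_stack)*m and reset.
-- min? with .getD 0 is exact: the branch fires only when temp_stack is nonempty.
def aStep (m : Int) (st : List Int × Int) (x : Int) : List Int × Int :=
  let temp := st.1 ++ [x]
  if (temp.length : Int) = m then
    ([], st.2 + ((PySem.List.min? temp (fun y => y)).getD 0) * m)
  else (temp, st.2)

-- pyGetD default 0 is exact: i ranges over range(len(score)) and sort_score has score's length.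
def solution (k : Int) (m : Int) (score : List Int) : Int :=
  let sortScore := PySem.List.sorted score (fun x => x) true
  ((PySem.List.pyRange 0 (score.length : Int) 1).foldl
    (fun (st : List Int × Int) i => aStep m st (PySem.List.pyGetD sortScore i 0))
    (([] : List Int), (0 : Int))).2

-- ===== PORT B =====
-- the 'while vals and c + counts[vals[0]] < r: …' loop of Source B, consuming vals from the front
def advance (counts : PySem.Dict Int Int) (r : Int) : List Int → Int → List Int × Int
  | [], c => ([], c)
  | v :: rest, c =>
    if c + counts.getD v 0 < r then advance counts r rest (c + counts.getD v 0)
    else (v :: rest, c)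

-- one iteration of Source B's for-loop: advance the merge pointer, then total += vals[0]
-- (pyGetD default 0 is exact: vals is nonempty whenever the loop body reads vals[0], since r ≤ len(score))
def bStep (counts : PySem.Dict Int Int) (st : List Int × Int × Int) (r : Int) : List Int × Int × Int :=
  let a := advance counts r st.1 st.2.1
  (a.1, a.2, st.2.2 + PySem.List.pyGetD a.1 0 0)

def solution_alt (k : Int) (m : Int) (score : List Int) : Int :=
  let counts := score.foldl (fun d x => d.insert x (d.getD x 0 + 1)) PySem.Dict.empty
  let vals := PySem.List.sorted counts.keys (fun v => v) true
  ((PySem.List.pyRange m ((score.length : Int) + 1) m).foldl (bStep counts) (vals, 0, 0)).2.2 * m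

-- ===== PRECONDITION & SPEC =====
-- Pre_ excludes only m = 0, where A returns 0 degenerately (the box never fills) while B's
-- natural range(m, len(score)+1, m) raises ValueError (zero step).
def Pre_solution (k : Int) (m : Int) (score : List Int) : Prop := m ≠ 0
instance (k : Int) (m : Int) (score : List Int) : Decidable (Pre_solution k m score) := by unfold Pre_solution; infer_instance
def pvWitness_solution : Int × Int × List Int := (0, 1, [1])
def Spec_solution (k : Int) (m : Int) (score : List Int) (out : Int) : Prop := out = solution_alt k m score
instance (k : Int) (m : Int) (score : List Int) (out : Int) : Decidable (Spec_solution k m score out) := by unfold Spec_solution; infer_instance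

-- ===== CLAIM (what is proved, stated in full; the proofs are below) =====
def Claim_equal_solution : Prop := ∀ (k : Int) (m : Int) (score : List Int), Dom_solution k m score → Pre_solution k m score → Spec_solution k m score (solution k m score)

-- ===== LEMMAS AND PROOFS =====

-- ---------- A side: A's fold = (sum of block minima of the descending-sorted list) * m ----------

-- sum of the minima of the complete m-boxes, c = remaining capacity of the current box
def bsum (mm : Nat) : List Int → Nat → Int
  | [], _ => 0
  | x :: t, c => if c ≤ 1 then x + bsum mm t mm else bsum mm t (c - 1)

lemma min_append_singleton (temp : List Int) (x : Int) (h : ∀ a ∈ temp, x ≤ a) :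
    ((PySem.List.min? (temp ++ [x]) (fun y => y)).getD 0) = x := by
  have hne : temp ++ [x] ≠ [] := by simp
  rcases hmin : PySem.List.min? (temp ++ [x]) (fun y => y) with _ | v
  · rw [PySem.List.min?_eq_none_iff] at hmin
    exact absurd hmin hne
  · have hmem := PySem.List.min?_mem hmin
    have hisMin := PySem.List.min?_isMin hmin
    have h1 : v ≤ x := hisMin x (by simp)
    have h2 : x ≤ v := by
      rcases List.mem_append.mp hmem with hv' | hv'
      · exact h v hv'
      · simp at hv'; omega
    simp; omega

lemma aStep_full (m : Int) (temp : List Int) (ans x : Int) (h : (temp.length : Int) + 1 = m) :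
    aStep m (temp, ans) x = ([], ans + ((PySem.List.min? (temp ++ [x]) (fun y => y)).getD 0) * m) := by
  simp only [aStep]
  rw [if_pos (by simp; omega)]

lemma aStep_part (m : Int) (temp : List Int) (ans x : Int) (h : (temp.length : Int) + 1 ≠ m) :
    aStep m (temp, ans) x = (temp ++ [x], ans) := by
  simp only [aStep]
  rw [if_neg (by simp; omega)]

lemma aFold (m : Int) (mm : Nat) (hm : m = (mm : Int)) (h1 : 1 ≤ mm) :
    ∀ (l temp : List Int) (ans : Int), temp.length < mm →
      (temp ++ l).Pairwise (fun a b => b ≤ a) →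
      (l.foldl (aStep m) (temp, ans)).2 = ans + bsum mm l (mm - temp.length) * m := by
  intro l
  induction l with
  | nil => intro temp ans _ _; simp [bsum]
  | cons x t ih =>
    intro temp ans hlen hpw
    have hpw' : (temp ++ [x] ++ t).Pairwise (fun a b => b ≤ a) := by
      simpa [List.append_assoc] using hpw
    have hsplit := List.pairwise_append.mp hpw'
    have hxmin : ∀ a ∈ temp, x ≤ a := by
      intro a ha
      exact (List.pairwise_append.mp hpw).2.2 a ha x (by simp)
    rw [List.foldl_cons]
    by_cases hc : temp.length + 1 = mm
    · rw [aStep_full m temp ans x (by omega)]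
      rw [ih [] _ (by simp; omega) (by simpa using hsplit.2.1)]
      rw [min_append_singleton temp x hxmin]
      have hcc : mm - temp.length ≤ 1 := by omega
      simp only [bsum, if_pos hcc, List.length_nil, Nat.sub_zero]
      ring
    · rw [aStep_part m temp ans x (by omega)]
      rw [ih (temp ++ [x]) ans (by simp; omega) hpw']
      have hgt : ¬ (mm - temp.length ≤ 1) := by omega
      simp only [bsum, if_neg hgt]
      have : mm - (temp ++ [x]).length = mm - temp.length - 1 := by simp; omega
      rw [this]

lemma bsum_small (mm : Nat) : ∀ (s : List Int) (c : Nat), s.length < c → bsum mm s c = 0 := by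
  intro s
  induction s with
  | nil => intro c _; simp [bsum]
  | cons x t ih =>
    intro c hc
    simp at hc
    have : ¬ (c ≤ 1) := by omega
    simp only [bsum, if_neg this]
    exact ih (c - 1) (by omega)

lemma bsum_chunk (mm : Nat) : ∀ (s : List Int) (c : Nat), 1 ≤ c → c ≤ s.length →
    bsum mm s c = s.getD (c - 1) 0 + bsum mm (s.drop c) mm := by
  intro s
  induction s with
  | nil => intro c h1 h2; simp at h2; omega
  | cons x t ih =>
    intro c h1 h2
    by_cases hc : c ≤ 1
    · have : c = 1 := by omega
      subst this
      simp [bsum]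
    · have h2' : c - 1 ≤ t.length := by simp at h2; omega
      rw [show bsum mm (x :: t) c = bsum mm t (c - 1) from by simp [bsum, hc]]
      rw [ih (c - 1) (by omega) h2']
      obtain ⟨d, rfl⟩ : ∃ d, c = d + 2 := ⟨c - 2, by omega⟩
      have e1 : (x :: t).getD (d + 2 - 1) 0 = t.getD (d + 2 - 1 - 1) 0 := by simp
      have e2 : (x :: t).drop (d + 2) = t.drop (d + 2 - 1) := by simp
      rw [e1, e2]

lemma bsum_rank (mm : Nat) (h1 : 1 ≤ mm) :
    ∀ (n : Nat) (s : List Int), s.length = n →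
      bsum mm s mm = ((List.range (n / mm)).map (fun b => s.getD ((b + 1) * mm - 1) 0)).sum := by
  intro n
  induction n using Nat.strong_induction_on with
  | _ n ih =>
    intro s hn
    by_cases hsmall : n < mm
    · rw [Nat.div_eq_of_lt hsmall]
      simp [bsum_small mm s mm (by omega)]
    · push_neg at hsmall
      set q := n / mm with hq
      have hq1 : 1 ≤ q := Nat.one_le_div_iff (by omega) |>.mpr hsmall
      rw [bsum_chunk mm s mm h1 (by omega)]
      have hlen : (s.drop mm).length = n - mm := by simp [hn]
      have hdivq : (n - mm) / mm = q - 1 := by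
        have hmod := Nat.mod_lt n (show 0 < mm by omega)
        have h2 : mm * q + n % mm = n := Nat.div_add_mod n mm
        have h3 : n - mm = mm * (q - 1) + n % mm := by
          have : mm * q = mm * (q - 1) + mm := by
            obtain ⟨p, hp⟩ : ∃ p, q = p + 1 := ⟨q - 1, by omega⟩
            rw [hp]
            simp [Nat.mul_succ]
          omega
        rw [h3, Nat.mul_add_div (by omega), Nat.div_eq_of_lt hmod]
        omega
      rw [ih (n - mm) (by omega) (s.drop mm) hlen, hdivq]
      obtain ⟨p, hp⟩ : ∃ p, q = p + 1 := ⟨q - 1, by omega⟩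
      rw [hp]
      rw [List.range_succ_eq_map]
      rw [List.map_cons, List.sum_cons]
      have hfirst : s.getD ((0 + 1) * mm - 1) 0 = s.getD (mm - 1) 0 := by norm_num
      have hrest : (List.range p).map ((fun b => s.getD ((b + 1) * mm - 1) 0) ∘ Nat.succ)
          = (List.range p).map (fun b => (s.drop mm).getD ((b + 1) * mm - 1) 0) := by
        apply List.map_congr_left
        intro b hb
        simp only [Function.comp_apply]
        have hb1 : (b.succ + 1) * mm - 1 = mm + ((b + 1) * mm - 1) := by
          have h1m : 1 ≤ (b + 1) * mm := Nat.one_le_iff_ne_zero.mpr (by positivity)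
          have hmul : (b.succ + 1) * mm = mm + (b + 1) * mm := by simp only [Nat.succ_eq_add_one]; ring
          omega
        rw [hb1]
        rw [List.getD_eq_getElem?_getD, List.getD_eq_getElem?_getD, List.getElem?_drop]
      rw [List.map_map, hrest, hfirst]
      simp [hp]

-- the branch of aStep never fires when m < 0 (temp grows from length ≥ 1)
lemma aFold_neg (m : Int) (hm : m < 0) :
    ∀ (l : List Int) (st : List Int × Int), (l.foldl (aStep m) st).2 = st.2 := by
  intro l
  induction l with
  | nil => intro st; rfl
  | cons x t ih =>
    intro st
    rw [List.foldl_cons, aStep_part m st.1 st.2 x (by omega)]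
    exact ih _

-- ---------- B side: the counter merge reads exactly the rank-r elements of the sorted list ----------

-- the distinct values with their multiplicities, flattened
def flatv (score : List Int) (vals : List Int) : List Int :=
  vals.flatMap (fun v => List.replicate (score.count v) v)

lemma count_flatv (score : List Int) :
    ∀ (vals : List Int), vals.Nodup → ∀ x,
      (flatv score vals).count x = if x ∈ vals then score.count x else 0 := by
  intro vals
  induction vals with
  | nil => intro _ x; simp [flatv]
  | cons v rest ih =>
    intro hnd x
    have hnd' := hnd
    rw [List.nodup_cons] at hnd'
    have : flatv score (v :: rest) = List.replicate (score.count v) v ++ flatv score rest := by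
      simp [flatv]
    rw [this, List.count_append, ih hnd'.2 x, List.count_replicate]
    by_cases hx : x = v
    · subst hx
      simp [hnd'.1]
    · simp [hx, Ne.symm hx, List.mem_cons]

lemma mem_flatv (score : List Int) (vals : List Int) (x : Int) (h : x ∈ flatv score vals) :
    x ∈ vals := by
  simp only [flatv, List.mem_flatMap] at h
  obtain ⟨v, hv, hx⟩ := h
  rw [List.eq_of_mem_replicate hx]
  exact hv

lemma pairwise_flatv (score : List Int) :
    ∀ (vals : List Int), vals.Pairwise (fun a b => b < a) →
      (flatv score vals).Pairwise (fun a b => b ≤ a) := by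
  intro vals
  induction vals with
  | nil => intro _; simp [flatv]
  | cons v rest ih =>
    intro hpw
    rw [List.pairwise_cons] at hpw
    have : flatv score (v :: rest) = List.replicate (score.count v) v ++ flatv score rest := by
      simp [flatv]
    rw [this, List.pairwise_append]
    refine ⟨?_, ih hpw.2, ?_⟩
    · exact List.pairwise_replicate.mpr (Or.inr (le_refl v))
    · intro a ha b hb
      rw [List.eq_of_mem_replicate ha]
      have hbv : b < v := hpw.1 b (mem_flatv score rest b hb)
      omega

-- flattening the descending-sorted distinct values with their counts IS the descending-sorted list
lemma flatv_sorted_keys (score : List Int) :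
    flatv score (PySem.List.sorted (PySem.Set.ofList score) (fun v => v) true)
      = PySem.List.sorted score (fun v => v) true := by
  set vals := PySem.List.sorted (PySem.Set.ofList score) (fun v : Int => v) true with hvals
  set s := PySem.List.sorted score (fun v : Int => v) true with hs
  have hvperm : vals.Perm (PySem.Set.ofList score) := PySem.List.sorted_perm ..
  have hvnd : vals.Nodup := hvperm.nodup_iff.mpr (PySem.Set.nodup_ofList score)
  have hvpw : vals.Pairwise (fun a b : Int => b < a) := by
    have h1 : vals.Pairwise (fun a b : Int => b ≤ a) := by
      simpa using PySem.List.sorted_pairwise_rev (PySem.Set.ofList score) (fun v : Int => v)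
    have h2 : vals.Pairwise (fun a b : Int => a ≠ b) := hvnd
    exact (h1.and h2).imp (by intro a b h; omega)
  have hperm : (flatv score vals).Perm s := by
    have hsp : s.Perm score := PySem.List.sorted_perm ..
    refine List.Perm.trans ?_ hsp.symm
    rw [List.perm_iff_count]
    intro x
    rw [count_flatv score vals hvnd x]
    by_cases hx : x ∈ score
    · rw [if_pos]
      rw [hvals, PySem.List.mem_sorted, PySem.Set.mem_ofList]
      exact hx
    · rw [if_neg, List.count_eq_zero_of_not_mem hx]
      rw [hvals, PySem.List.mem_sorted, PySem.Set.mem_ofList]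
      exact hx
  have hsd : s.Pairwise (fun a b : Int => b ≤ a) := by
    simpa using PySem.List.sorted_pairwise_rev score (fun v : Int => v)
  have hfd : (flatv score vals).Pairwise (fun a b : Int => b ≤ a) := pairwise_flatv score vals hvpw
  exact PySem.List.eq_of_perm_of_pairwise_le_of_injective (fun x : Int => -x) neg_injective
    hperm (hfd.imp (by intro a b h; dsimp only; omega)) (hsd.imp (by intro a b h; dsimp only; omega))

-- the while loop: under the invariant it lands on the value holding rank r
lemma advance_spec (score s : List Int) (r : Int) (hr : r ≤ (s.length : Int)) :
    ∀ (vals : List Int) (c : Int), 0 ≤ c → c < r →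
      s.drop c.toNat = flatv score vals →
      0 ≤ (advance (PySem.Dict.counter score) r vals c).2 ∧
      (advance (PySem.Dict.counter score) r vals c).2 < r ∧
      s.drop (advance (PySem.Dict.counter score) r vals c).2.toNat
        = flatv score (advance (PySem.Dict.counter score) r vals c).1 ∧
      PySem.List.pyGetD (advance (PySem.Dict.counter score) r vals c).1 0 0
        = PySem.List.pyGetD s (r - 1) 0 := by
  intro vals
  induction vals with
  | nil =>
    intro c hc0 hcr hinv
    exfalso
    simp only [flatv, List.flatMap_nil] at hinv
    have : s.length ≤ c.toNat := by
      by_contra hlt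
      push_neg at hlt
      have := List.drop_eq_nil_iff.mp hinv
      omega
    omega
  | cons v rest ih =>
    intro c hc0 hcr hinv
    have hcnt : (PySem.Dict.counter score).getD v 0 = (score.count v : Int) :=
      PySem.Dict.getD_counter score v
    by_cases hb : c + (PySem.Dict.counter score).getD v 0 < r
    · have hstep : advance (PySem.Dict.counter score) r (v :: rest) c
          = advance (PySem.Dict.counter score) r rest (c + (PySem.Dict.counter score).getD v 0) := by
        simp only [advance, if_pos hb]
      rw [hstep]
      apply ih
      · omega
      · exact hb
      · rw [hcnt]
        have : (c + (score.count v : Int)).toNat = c.toNat + (score.count v) := by omega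
        rw [this, ← List.drop_drop, hinv]
        have hfl : flatv score (v :: rest) = List.replicate (score.count v) v ++ flatv score rest := by
          simp [flatv]
        rw [hfl]
        simpa using List.drop_left (List.replicate (score.count v) v) (flatv score rest)
    · have hstep : advance (PySem.Dict.counter score) r (v :: rest) c = (v :: rest, c) := by
        simp only [advance, if_neg hb]
      rw [hstep]
      refine ⟨hc0, hcr, hinv, ?_⟩
      have hj : (r - 1).toNat < s.length := by omega
      have hcj : c.toNat ≤ (r - 1).toNat := by omega
      have hrc : (r - 1).toNat - c.toNat < score.count v := by
        rw [hcnt] at hb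
        omega
      have hgoal : s[(r - 1).toNat]'hj = v := by
        have hd : s[(r - 1).toNat]'hj = (s.drop c.toNat)[(r - 1).toNat - c.toNat]'(by
            rw [List.length_drop]; omega) := by
          rw [List.getElem_drop]
          congr 1
          omega
        rw [hd]
        have hflat : flatv score (v :: rest)
            = List.replicate (score.count v) v ++ flatv score rest := by simp [flatv]
        have hlenr : (r - 1).toNat - c.toNat < (List.replicate (score.count v) v).length := by
          simpa using hrc
        rw [List.getElem_of_eq (hinv.trans hflat)]
        rw [List.getElem_append_left hlenr, List.getElem_replicate]
      have hlhs : PySem.List.pyGetD (v :: rest) 0 0 = v := by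
        rw [PySem.List.pyGetD_ofNat']
        rfl
      have hr1 : r - 1 = (((r - 1).toNat : Nat) : Int) := by omega
      rw [hlhs, hr1, PySem.List.pyGetD_natCast]
      rw [List.getD_eq_getElem?_getD, List.getElem?_eq_getElem hj, hgoal]
      rfl

-- the for-loop over the box-end ranks accumulates exactly the rank-r elements
lemma fold_ranks (score s : List Int) :
    ∀ (ranks vals : List Int) (c total : Int),
      0 ≤ c → ranks.Pairwise (· < ·) →
      (∀ r ∈ ranks, c < r ∧ r ≤ (s.length : Int)) →
      s.drop c.toNat = flatv score vals →
      (ranks.foldl (bStep (PySem.Dict.counter score)) (vals, c, total)).2.2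
        = total + (ranks.map (fun r => PySem.List.pyGetD s (r - 1) 0)).sum := by
  intro ranks
  induction ranks with
  | nil => intro vals c total _ _ _ _; simp
  | cons r rest ih =>
    intro vals c total hc0 hpw hmem hinv
    obtain ⟨hcr, hrn⟩ := hmem r (by simp)
    obtain ⟨h0, h1, h2, h3⟩ := advance_spec score s r hrn vals c hc0 hcr hinv
    rw [List.foldl_cons]
    have hbs : bStep (PySem.Dict.counter score) (vals, c, total) r
        = ((advance (PySem.Dict.counter score) r vals c).1,
           (advance (PySem.Dict.counter score) r vals c).2,
           total + PySem.List.pyGetD (advance (PySem.Dict.counter score) r vals c).1 0 0) := by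
      rfl
    rw [hbs, ih _ _ _ h0 (List.Pairwise.sublist (by simp) hpw) ?_ h2]
    · rw [h3, List.map_cons, List.sum_cons]
      ring
    · intro r2 hr2
      refine ⟨?_, (hmem r2 (by simp [hr2])).2⟩
      have : r < r2 := (List.pairwise_cons.mp hpw).1 r2 hr2
      omega

-- range(m, n+1, m) for 1 ≤ m is the list of box-end ranks m·1, …, m·(n/m)
lemma ranks_eq (n : Nat) (m : Int) (hm : 1 ≤ m) :
    PySem.List.pyRange m ((n : Int) + 1) m
      = (List.range (((n : Int) / m).toNat)).map (fun k : Nat => m + m * (k : Int)) := by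
  have hcnt : (if m < (n : Int) + 1 then ((((n : Int) + 1) - m + m - 1) / m).toNat else 0)
      = (((n : Int)) / m).toNat := by
    by_cases h : m < (n : Int) + 1
    · rw [if_pos h]
      have he : ((n : Int) + 1) - m + m - 1 = (n : Int) := by ring
      rw [he]
    · rw [if_neg h]
      have : (n : Int) / m = 0 := Int.ediv_eq_zero_of_lt (by omega) (by omega)
      simp [this]
  rw [PySem.List.pyRange_of_pos _ _ (by omega), hcnt]

-- ===== VERDICT (by name: the statement is the Claim_ definition above) =====
theorem solution_spec : Claim_equal_solution := by
  intro k m score _ hpre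
  unfold Spec_solution solution solution_alt
  simp only []
  set s := PySem.List.sorted score (fun x : Int => x) true with hs
  have hlen : score.length = s.length := (PySem.List.length_sorted ..).symm
  have hcounter : score.foldl (fun d x => d.insert x (d.getD x 0 + 1)) PySem.Dict.empty
      = PySem.Dict.counter score := PySem.Dict.foldl_insert_getD_add_one_eq_counter score
  rw [hlen, hcounter, PySem.Dict.keys_counter]
  rw [PySem.List.foldl_pyRange_zero_pyGetD' s 0 (aStep m) (([] : List Int), (0 : Int))]
  rcases lt_or_gt_of_ne (show m ≠ 0 from hpre) with hneg | hpos
  · -- m < 0: A's box never fills; B's rank range is empty; both sides are 0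
    rw [aFold_neg m hneg]
    have hempty : PySem.List.pyRange m ((s.length : Int) + 1) m = [] := by
      simp only [PySem.List.pyRange]
      rw [if_neg (by omega)]
      rw [if_neg (by omega), if_neg (by omega)]
      simp
    rw [hempty]
    simp
  · -- 1 ≤ m
    have hmm : m = ((m.toNat : Nat) : Int) := by omega
    have h1 : 1 ≤ m.toNat := by omega
    have hpw : s.Pairwise (fun a b : Int => b ≤ a) := by
      simpa using PySem.List.sorted_pairwise_rev score (fun x : Int => x)
    rw [aFold m m.toNat hmm h1 s [] 0 (by simp; omega) (by simpa using hpw)]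
    simp only [List.length_nil, Nat.sub_zero]
    rw [bsum_rank m.toNat h1 s.length s rfl]
    -- B's fold
    have hranks := ranks_eq s.length m (by omega)
    have hfold := fold_ranks score s (PySem.List.pyRange m ((s.length : Int) + 1) m)
        (PySem.List.sorted (PySem.Set.ofList score) (fun v : Int => v) true) 0 0
        (by omega)
        (by
          rw [hranks]
          refine List.Pairwise.map _ ?_ List.pairwise_lt_range
          intro a b hab
          have : (a : Int) < (b : Int) := by exact_mod_cast hab
          nlinarith)
        (by
          intro r hrmem
          rw [hranks, List.mem_map] at hrmem
          obtain ⟨b, hb, rfl⟩ := hrmem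
          rw [List.mem_range] at hb
          constructor
          · positivity
          · have hble : (b : Int) + 1 ≤ (s.length : Int) / m := by
              have : (b : Int) < (((s.length : Int) / m).toNat : Int) := by exact_mod_cast hb
              omega
            have := Int.ediv_mul_le (s.length : Int) (show m ≠ 0 by omega)
            have hmul : ((b : Int) + 1) * m ≤ ((s.length : Int) / m) * m := by
              exact mul_le_mul_of_nonneg_right hble (by omega)
            nlinarith [Int.ediv_mul_le (s.length : Int) (show m ≠ 0 by omega),
              Int.lt_ediv_add_one_mul_self (s.length : Int) (show 0 < m by omega)]
          )
        (by rw [flatv_sorted_keys score, ← hs]; rfl)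
    rw [hfold]
    rw [hranks, List.map_map]
    -- the two sums are termwise equal
    have hmn : ((m.toNat : Nat) : Int) = m := by omega
    have hq : (((s.length : Int) / m).toNat) = s.length / m.toNat := by
      have hcast : ((s.length / m.toNat : Nat) : Int) = (s.length : Int) / m := by
        rw [Int.natCast_div, hmn]
      rw [← hcast, Int.toNat_natCast]
    rw [hq]
    have hterm : (List.range (s.length / m.toNat)).map
          ((fun r => PySem.List.pyGetD s (r - 1) 0) ∘ (fun k : Nat => m + m * (k : Int)))
        = (List.range (s.length / m.toNat)).map (fun b => s.getD ((b + 1) * m.toNat - 1) 0) := by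
      apply List.map_congr_left
      intro b hb
      simp only [Function.comp_apply]
      have hidx : m + m * (b : Int) - 1 = (((b + 1) * m.toNat - 1 : Nat) : Int) := by
        have h1m : 1 ≤ (b + 1) * m.toNat := Nat.one_le_iff_ne_zero.mpr (by positivity)
        rw [Nat.cast_sub h1m]
        push_cast
        rw [hmn]
        ring
      rw [hidx, PySem.List.pyGetD_natCast]
    rw [hterm]
    ring
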